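-- pv_equiv track=rewrite | github.com/ghollingworth/pichat | citation_renderer.py | extract_markdown_blocks
-- ===== SOURCE A (Python) =====
-- def extract_markdown_blocks(markdown_text):
--     """Extract contiguous non-empty line blocks with line ranges."""
--     if markdown_text is None:
--         markdown_text = ""
--     lines = markdown_text.splitlines()
--     blocks = []
--     block_start = None
--     for idx, line in enumerate(lines, start=1):
--         if line.strip():
--             if block_start is None:
--                 block_start = idx
--         else:
--             if block_start is not None:
--                 blocks.append({"start_line": block_start, "end_line": idx - 1})
--                 block_start = None
--     if block_start is not None:
--         blocks.append({"start_line": block_start, "end_line": len(lines)})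
--     return blocks
-- ===== SOURCE B (Python) =====
-- def extract_markdown_blocks(markdown_text):
--     """Extract contiguous non-empty line blocks with line ranges."""
--     lines = (markdown_text or "").splitlines()
--     nb = [bool(line.strip()) for line in lines]
--     starts = [i for i, (p, b) in enumerate(zip([False] + nb, nb), start=1) if b and not p]
--     ends = [i for i, (b, n) in enumerate(zip(nb, nb[1:] + [False]), start=1) if b and not n]
--     return [{"start_line": s, "end_line": e} for s, e in zip(starts, ends)]
-- ===== Notes on version B (the rewrite author's own statement) =====
-- stated objective: alternative
-- what changed: Replaces A's per-line block_start state machine with its post-loop flush by stateless boundary detection: mark a line as a block start/end by comparing its non-blankness with its shifted neighbour via zip, then zip the start and end lists into blocks.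
import Mathlib
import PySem

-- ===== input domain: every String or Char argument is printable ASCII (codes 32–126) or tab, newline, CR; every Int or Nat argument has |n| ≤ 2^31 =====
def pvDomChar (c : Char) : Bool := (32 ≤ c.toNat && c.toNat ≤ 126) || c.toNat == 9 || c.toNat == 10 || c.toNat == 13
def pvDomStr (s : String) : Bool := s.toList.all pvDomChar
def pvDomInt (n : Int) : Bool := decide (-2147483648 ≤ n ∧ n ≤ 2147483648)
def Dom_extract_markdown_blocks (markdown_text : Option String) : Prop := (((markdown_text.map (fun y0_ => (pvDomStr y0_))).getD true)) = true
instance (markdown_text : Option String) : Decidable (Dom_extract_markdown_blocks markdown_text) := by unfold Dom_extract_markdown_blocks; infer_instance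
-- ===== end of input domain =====

-- B replaces A's block_start state machine (with its post-loop flush) by boundary detection:
-- mark block starts/ends by comparing each line's non-blankness with its neighbour's, then zip
-- the two boundary lists; objective: alternative (same cost, different decomposition).

-- ===== PORT A =====
def extract_markdown_blocks (markdown_text : Option String) : List (List (String × Int)) :=
  let markdown_text := markdown_text.getD ""        -- if markdown_text is None: markdown_text = ""
  let lines := PySem.Str.splitlines markdown_text
  let st := (PySem.List.enumerate lines 1).foldl
    (fun (acc : List (List (String × Int)) × Option Int) p =>
      let blocks := acc.1
      let block_start := acc.2
      let idx := p.1
      let line := p.2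
      if PySem.Str.strip line != "" then
        match block_start with
        | none => (blocks, some idx)
        | some _ => (blocks, block_start)
      else
        match block_start with
        | some b => (blocks ++ [[("start_line", b), ("end_line", idx - 1)]], none)
        | none => (blocks, none))
    ([], none)
  match st.2 with
  | some b => st.1 ++ [[("start_line", b), ("end_line", (lines.length : Int))]]
  | none => st.1

-- ===== PORT B =====
def extract_markdown_blocks_alt (markdown_text : Option String) : List (List (String × Int)) :=
  let lines := PySem.Str.splitlines (markdown_text.getD "")
  let nb := lines.map (fun line => PySem.Str.strip line != "")
  let starts := (PySem.List.enumerate ((false :: nb).zip nb) 1).filterMap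
      (fun p => if p.2.2 && !p.2.1 then some p.1 else none)
  let ends := (PySem.List.enumerate (nb.zip (PySem.List.slice nb (some 1) none ++ [false])) 1).filterMap
      (fun p => if p.2.1 && !p.2.2 then some p.1 else none)
  (starts.zip ends).map (fun p => [("start_line", p.1), ("end_line", p.2)])

-- ===== PRECONDITION & SPEC =====
def Spec_extract_markdown_blocks (markdown_text : Option String) (out : List (List (String × Int))) : Prop := out = extract_markdown_blocks_alt markdown_text
instance (markdown_text : Option String) (out : List (List (String × Int))) : Decidable (Spec_extract_markdown_blocks markdown_text out) := by unfold Spec_extract_markdown_blocks; infer_instance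

-- ===== CLAIM (what is proved, stated in full; the proofs are below) =====
def Claim_equal_extract_markdown_blocks : Prop := ∀ (markdown_text : Option String), Dom_extract_markdown_blocks markdown_text → Spec_extract_markdown_blocks markdown_text (extract_markdown_blocks markdown_text)

-- ===== LEMMAS AND PROOFS =====

/-- non-blank test shared by both ports -/
def pvNB (line : String) : Bool := PySem.Str.strip line != ""

def pvEntry (p : Int × Int) : List (String × Int) := [("start_line", p.1), ("end_line", p.2)]

/-- direct-emission form of A's loop -/
def pvSpec : List String → Int → Option Int → List (List (String × Int))
  | [], _, none => []
  | [], i, some s => [pvEntry (s, i - 1)]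
  | l :: t, i, none =>
    if pvNB l then pvSpec t (i + 1) (some i) else pvSpec t (i + 1) none
  | l :: t, i, some s =>
    if pvNB l then pvSpec t (i + 1) (some s)
    else pvEntry (s, i - 1) :: pvSpec t (i + 1) none

/-- recursive form of B's start-boundary list -/
def pvStarts : Bool → Int → List Bool → List Int
  | _, _, [] => []
  | p, i, b :: t => (if b && !p then [i] else []) ++ pvStarts b (i + 1) t

/-- recursive form of B's end-boundary list -/
def pvEnds : Int → List Bool → List Int
  | _, [] => []
  | i, b :: t => (if b && !(t.headD false) then [i] else []) ++ pvEnds (i + 1) t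

def pvAStep (acc : List (List (String × Int)) × Option Int) (p : Int × String) :
    List (List (String × Int)) × Option Int :=
  if PySem.Str.strip p.2 != "" then
    match acc.2 with
    | none => (acc.1, some p.1)
    | some _ => (acc.1, acc.2)
  else
    match acc.2 with
    | some b => (acc.1 ++ [[("start_line", b), ("end_line", p.1 - 1)]], none)
    | none => (acc.1, none)

theorem pvA_loop (l : List String) : ∀ (i : Int) (st : Option Int) (blocks : List (List (String × Int))),
    (match ((PySem.List.enumerate l i).foldl pvAStep (blocks, st)).2 with
     | some b => ((PySem.List.enumerate l i).foldl pvAStep (blocks, st)).1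
          ++ [[("start_line", b), ("end_line", i + (l.length : Int) - 1)]]
     | none => ((PySem.List.enumerate l i).foldl pvAStep (blocks, st)).1)
    = blocks ++ pvSpec l i st := by
  induction l with
  | nil =>
    intro i st blocks
    cases st <;> simp [PySem.List.enumerate_nil, pvSpec, pvEntry]
  | cons x t ih =>
    intro i st blocks
    rw [PySem.List.enumerate_cons]
    simp only [List.foldl_cons]
    have harith : (i + 1) + (t.length : Int) - 1 = i + ((t.length : Int) + 1) - 1 := by ring
    by_cases hx : pvNB x
    · cases st with
      | none =>
        have : pvAStep (blocks, none) (i, x) = (blocks, some i) := by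
          simp [pvAStep, pvNB] at hx ⊢; simp [hx]
        rw [this, pvSpec]
        simp only [hx, if_pos]
        rw [← ih (i + 1) (some i) blocks]
        simp [harith]
      | some s =>
        have : pvAStep (blocks, some s) (i, x) = (blocks, some s) := by
          simp [pvAStep, pvNB] at hx ⊢; simp [hx]
        rw [this, pvSpec]
        simp only [hx, if_pos]
        rw [← ih (i + 1) (some s) blocks]
        simp [harith]
    · cases st with
      | none =>
        have : pvAStep (blocks, none) (i, x) = (blocks, none) := by
          simp [pvAStep, pvNB] at hx ⊢; simp [hx]
        rw [this, pvSpec]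
        simp only [hx, if_neg, Bool.false_eq_true, not_false_iff]
        rw [← ih (i + 1) none blocks]
        simp [harith]
      | some s =>
        have : pvAStep (blocks, some s) (i, x)
            = (blocks ++ [[("start_line", s), ("end_line", i - 1)]], none) := by
          simp [pvAStep, pvNB] at hx ⊢; simp [hx]
        rw [this, pvSpec]
        simp only [hx, Bool.false_eq_true, if_false]
        have hre : blocks ++ pvEntry (s, i - 1) :: pvSpec t (i + 1) none
            = (blocks ++ [[("start_line", s), ("end_line", i - 1)]]) ++ pvSpec t (i + 1) none := by
          simp [pvEntry]
        rw [hre, ← ih (i + 1) none (blocks ++ [[("start_line", s), ("end_line", i - 1)]])]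
        simp [harith]

/-- A's port computes pvSpec. -/
theorem pvA_eq (mt : Option String) :
    extract_markdown_blocks mt = pvSpec (PySem.Str.splitlines (mt.getD "")) 1 none := by
  unfold extract_markdown_blocks
  have h := pvA_loop (PySem.Str.splitlines (mt.getD "")) 1 none []
  simp only [List.nil_append] at h
  rw [← h]
  have : (1 : Int) + ((PySem.Str.splitlines (mt.getD "")).length : Int) - 1
      = ((PySem.Str.splitlines (mt.getD "")).length : Int) := by ring
  rw [this]
  rfl

/-- B's starts comprehension is pvStarts. -/
theorem pvB_starts (nb : List Bool) : ∀ (p : Bool) (i : Int),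
    (PySem.List.enumerate ((p :: nb).zip nb) i).filterMap
      (fun q => if q.2.2 && !q.2.1 then some q.1 else none)
    = pvStarts p i nb := by
  induction nb with
  | nil => intro p i; simp [pvStarts, PySem.List.enumerate_nil]
  | cons b t ih =>
    intro p i
    simp only [List.zip_cons_cons, PySem.List.enumerate_cons, List.filterMap_cons]
    rw [ih b (i + 1)]
    by_cases h : b && !p <;> simp [pvStarts, h]

/-- B's ends comprehension is pvEnds. -/
theorem pvB_ends (nb : List Bool) : ∀ (i : Int),
    (PySem.List.enumerate (nb.zip (nb.tail ++ [false])) i).filterMap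
      (fun q => if q.2.1 && !q.2.2 then some q.1 else none)
    = pvEnds i nb := by
  induction nb with
  | nil => intro i; simp [pvEnds, PySem.List.enumerate_nil]
  | cons b t ih =>
    intro i
    have hz : (b :: t).zip (t ++ [false])
        = (b, t.headD false) :: t.zip (t.tail ++ [false]) := by
      cases t <;> simp
    simp only [List.tail_cons, hz, PySem.List.enumerate_cons, List.filterMap_cons]
    rw [ih (i + 1)]
    cases t with
    | nil => cases b <;> simp [pvEnds]
    | cons b' t' => cases b <;> cases b' <;> simp [pvEnds]

def pvSPrefix : Option Int → List Int
  | none => []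
  | some s => [s]

def pvEPrefix : Option Int → Int → List Bool → List Int
  | none, _, _ => []
  | some _, i, nb => if nb.headD false then [] else [i - 1]

/-- core equivalence: the state machine equals the zipped boundary lists. -/
theorem pvMain (l : List String) : ∀ (i : Int) (st : Option Int),
    pvSpec l i st
    = ((pvSPrefix st ++ pvStarts st.isSome i (l.map pvNB)).zip
       (pvEPrefix st i (l.map pvNB) ++ pvEnds i (l.map pvNB))).map pvEntry := by
  induction l with
  | nil =>
    intro i st
    cases st <;> simp [pvSpec, pvStarts, pvEnds, pvSPrefix, pvEPrefix, pvEntry]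
  | cons x t ih =>
    intro i st
    simp only [List.map_cons]
    by_cases hx : pvNB x
    · cases st with
      | none =>
        rw [pvSpec]
        simp only [hx, if_pos]
        rw [ih (i + 1) (some i)]
        simp only [pvStarts, pvEnds, pvSPrefix, pvEPrefix, Option.isSome_none, Option.isSome_some,
          Bool.not_false, Bool.and_true, Bool.true_and]
        have : (i + 1) - 1 = i := by ring
        cases ht : (t.map pvNB).headD false <;> simp [this]
      | some s =>
        rw [pvSpec]
        simp only [hx, if_pos]
        rw [ih (i + 1) (some s)]
        simp only [pvStarts, pvEnds, pvSPrefix, pvEPrefix, Option.isSome_some,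
          Bool.not_true, Bool.and_false, Bool.true_and]
        have : (i + 1) - 1 = i := by ring
        cases ht : (t.map pvNB).headD false <;> simp [this]
    · have hx' : pvNB x = false := by simpa using hx
      cases st with
      | none =>
        rw [pvSpec]
        simp only [hx', Bool.false_eq_true, if_false]
        rw [ih (i + 1) none]
        simp [pvStarts, pvEnds, pvSPrefix, pvEPrefix]
      | some s =>
        rw [pvSpec]
        simp only [hx', Bool.false_eq_true, if_false]
        rw [ih (i + 1) none]
        simp [pvStarts, pvEnds, pvSPrefix, pvEPrefix, pvEntry]

-- ===== VERDICT (by name: the statement is the Claim_ definition above) =====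
theorem extract_markdown_blocks_spec : Claim_equal_extract_markdown_blocks := by
  intro mt _
  unfold Spec_extract_markdown_blocks
  rw [pvA_eq, pvMain]
  unfold extract_markdown_blocks_alt
  simp only [PySem.List.slice_from_one]
  simp only [pvSPrefix, pvEPrefix, Option.isSome_none, List.nil_append]
  rw [pvB_starts, pvB_ends]
  rfl
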